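-- pv_equiv track=rewrite | github.com/MaNongkuxingseng/iStock | scripts/git_commit_notify_fixed.py | analyze_commit_message
-- ===== SOURCE A (Python) =====
-- from typing import List, Dict, Any
--
-- def analyze_commit_message(message: str) -> Dict[str, Any]:
--     """Analyze commit message"""
--     lines = message.strip().split('\n')
--
--     # Extract commit type and subject
--     commit_type = "other"
--     subject = ""
--
--     if lines:
--         first_line = lines[0].strip()
--         if ':' in first_line:
--             commit_type = first_line.split(':')[0].strip()
--             subject = first_line.split(':', 1)[1].strip()
--         else:
--             subject = first_line
--
--     # Extract description
--     description_lines = []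
--     in_description = False
--
--     for line in lines[1:]:
--         line = line.strip()
--         if line:
--             if line.startswith('- ') or line.startswith('* '):
--                 in_description = True
--                 description_lines.append(line)
--             elif in_description:
--                 description_lines.append(line)
--
--     return {
--         'type': commit_type,
--         'subject': subject,
--         'description': '\n'.join(description_lines),
--         'full_message': message
--     }
-- ===== SOURCE B (Python) =====
-- def _is_bullet(line):
--     return line.startswith('- ') or line.startswith('* ')
--
--
-- def analyze_commit_message(message):
--     """Analyze commit message (find-boundary-then-filter decomposition)."""
--     lines = message.strip().split('\n')
--
--     first = lines[0].strip()
--     if ':' in first: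
--         commit_type = first.split(':')[0].strip()
--         subject = first.split(':', 1)[1].strip()
--     else:
--         commit_type, subject = "other", first
--
--     stripped = [ln.strip() for ln in lines[1:]]
--     pivot = next((i for i, l in enumerate(stripped) if _is_bullet(l)), len(stripped))
--     description = '\n'.join(l for l in stripped[pivot:] if l)
--
--     return {
--         'type': commit_type,
--         'subject': subject,
--         'description': description,
--         'full_message': message,
--     }
-- ===== Notes on version B (the rewrite author's own statement) =====
-- stated objective: idiomatic
-- what changed: Replaces the in_description boolean state machine over lines[1:] with an explicit find-the-first-bullet pivot (next/enumerate) followed by a filter of the non-empty stripped lines from that pivot on; the first-line type/subject split is kept.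
import Mathlib
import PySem

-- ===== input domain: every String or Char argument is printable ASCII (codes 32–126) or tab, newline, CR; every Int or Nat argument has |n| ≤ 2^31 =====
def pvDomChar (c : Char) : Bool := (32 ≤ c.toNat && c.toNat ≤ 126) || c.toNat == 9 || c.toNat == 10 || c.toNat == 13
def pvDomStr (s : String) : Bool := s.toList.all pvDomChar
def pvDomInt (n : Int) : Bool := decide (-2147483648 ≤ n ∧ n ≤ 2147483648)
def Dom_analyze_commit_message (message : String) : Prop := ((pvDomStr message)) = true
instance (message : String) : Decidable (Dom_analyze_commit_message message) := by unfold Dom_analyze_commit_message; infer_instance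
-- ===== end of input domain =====

-- B replaces A's in_description flag state machine by a find-first-bullet pivot followed by a
-- filter of the non-empty stripped lines from the pivot on (idiomatic decomposition, same cost).

-- ===== PORT A =====
-- A's for-loop over lines[1:] with the (description_lines, in_description) state
def pvDescLoopA (ls : List String) (acc : List String) (flag : Bool) : List String :=
  match ls with
  | [] => acc
  | line :: rest =>
    let l := PySem.Str.strip line
    if l ≠ "" then
      if PySem.Str.startswith l "- " || PySem.Str.startswith l "* " then
        pvDescLoopA rest (acc ++ [l]) true
      else if flag then
        pvDescLoopA rest (acc ++ [l]) flag
      else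
        pvDescLoopA rest acc flag
    else
      pvDescLoopA rest acc flag

def analyze_commit_message (message : String) : List (String × String) :=
  let lines := (PySem.Str.split? (PySem.Str.strip message) "\n").getD []
  let ts :=
    match lines with
    | [] => ("other", "")
    | l0 :: _ =>
      let first_line := PySem.Str.strip l0
      if PySem.Str.isIn ":" first_line then
        (PySem.Str.strip (PySem.List.pyGetD ((PySem.Str.split? first_line ":").getD []) 0 ""),
         PySem.Str.strip (PySem.List.pyGetD ((PySem.Str.splitMax? first_line ":" 1).getD []) 1 ""))
      else
        ("other", first_line)
  let description_lines := pvDescLoopA (lines.drop 1) [] false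
  [("type", ts.1), ("subject", ts.2),
   ("description", PySem.Str.join "\n" description_lines), ("full_message", message)]

-- ===== PORT B =====
def pvIsBullet (l : String) : Bool :=
  PySem.Str.startswith l "- " || PySem.Str.startswith l "* "

def analyze_commit_message_alt (message : String) : List (String × String) :=
  let lines := (PySem.Str.split? (PySem.Str.strip message) "\n").getD []
  let first := PySem.Str.strip (PySem.List.pyGetD lines 0 "")
  let ts :=
    if PySem.Str.isIn ":" first then
      (PySem.Str.strip (PySem.List.pyGetD ((PySem.Str.split? first ":").getD []) 0 ""),
       PySem.Str.strip (PySem.List.pyGetD ((PySem.Str.splitMax? first ":" 1).getD []) 1 ""))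
    else
      ("other", first)
  let stripped := (lines.drop 1).map PySem.Str.strip
  -- pivot: index of the first bullet line (next(..., len(stripped)) = List.findIdx)
  let pivot := stripped.findIdx pvIsBullet
  let kept := (stripped.drop pivot).filter (fun l => decide (l ≠ ""))
  [("type", ts.1), ("subject", ts.2),
   ("description", PySem.Str.join "\n" kept), ("full_message", message)]

-- ===== PRECONDITION & SPEC =====
def Spec_analyze_commit_message (message : String) (out : List (String × String)) : Prop := out = analyze_commit_message_alt message
instance (message : String) (out : List (String × String)) : Decidable (Spec_analyze_commit_message message out) := by unfold Spec_analyze_commit_message; infer_instance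

-- ===== CLAIM (what is proved, stated in full; the proofs are below) =====
def Claim_equal_analyze_commit_message : Prop := ∀ (message : String), Dom_analyze_commit_message message → Spec_analyze_commit_message message (analyze_commit_message message)

-- ===== LEMMAS AND PROOFS =====

theorem pvDescLoopA_true (ls : List String) (acc : List String) :
    pvDescLoopA ls acc true = acc ++ (ls.map PySem.Str.strip).filter (fun l => decide (l ≠ "")) := by
  induction ls generalizing acc with
  | nil => simp [pvDescLoopA]
  | cons line rest ih =>
    simp only [pvDescLoopA, List.map_cons, List.filter_cons]
    by_cases h0 : PySem.Str.strip line = ""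
    · simp [h0, ih]
    · simp [h0, ih]

theorem pvDescLoopA_false (ls : List String) (acc : List String) :
    pvDescLoopA ls acc false =
      acc ++ (((ls.map PySem.Str.strip).drop ((ls.map PySem.Str.strip).findIdx pvIsBullet)).filter
        (fun l => decide (l ≠ ""))) := by
  induction ls generalizing acc with
  | nil => simp [pvDescLoopA]
  | cons line rest ih =>
    have hfold : (PySem.Str.startswith (PySem.Str.strip line) "- " || PySem.Str.startswith (PySem.Str.strip line) "* ") = pvIsBullet (PySem.Str.strip line) := rfl
    simp only [pvDescLoopA, List.map_cons, List.findIdx_cons, hfold]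
    by_cases hb : pvIsBullet (PySem.Str.strip line) = true
    · have h0 : ¬ PySem.Str.strip line = "" := by
        intro h; rw [h] at hb; exact absurd hb (by decide)
      rw [if_pos h0, if_pos hb, hb, cond_true, List.drop_zero, pvDescLoopA_true,
        List.filter_cons_of_pos (by simp [h0])]
      simp
    · have hbf : pvIsBullet (PySem.Str.strip line) = false := by simpa using hb
      rw [hbf, cond_false, List.drop_succ_cons]
      by_cases h0 : PySem.Str.strip line = ""
      · rw [if_neg (not_not_intro h0), ih]
      · rw [if_pos h0]
        simp [ih]

-- ===== VERDICT (by name: the statement is the Claim_ definition above) =====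
theorem analyze_commit_message_spec : Claim_equal_analyze_commit_message := by
  intro message _
  unfold Spec_analyze_commit_message analyze_commit_message analyze_commit_message_alt
  generalize (PySem.Str.split? (PySem.Str.strip message) "\n").getD [] = lines
  cases lines with
  | nil =>
    simp only [pvDescLoopA, List.drop_nil, List.map_nil, List.findIdx_nil, List.filter_nil]
    simp [PySem.List.pyGetD]
    decide
  | cons l0 rest =>
    have hget : PySem.List.pyGetD (l0 :: rest) (0 : Int) "" = l0 := by simp [PySem.List.pyGetD, PySem.List.pyGet?, PySem.List.pyIdx?]
    simp only [List.drop_succ_cons, hget]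
    rw [pvDescLoopA_false]
    simp
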